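-- pv_equiv track=rewrite | github.com/Butlerj9/firstproof | P03/experiments/exp17_inductive_reduction.py | spectral_vector
-- ===== SOURCE A (Python) =====
-- def spectral_vector(nu, n, q, t):
--     """Compute spectral vector xi_i(nu) for composition nu."""
--     # Standard ordering: sigma(i) based on rightmost ordering
--     # xi_i = q^{nu_i} * t^{rank_i} where rank_i depends on convention
--     # For Macdonald polynomials: xi_i = q^{nu_i} * t^{n - sigma(i)}
--     # where sigma orders by (nu_i, -i): larger nu first, ties broken by position
--     pairs = [(nu[i], -i) for i in range(n)]
--     sorted_indices = sorted(range(n), key=lambda i: pairs[i], reverse=True)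
--     rank = [0] * n
--     for r, i in enumerate(sorted_indices):
--         rank[i] = r  # rank 0 = highest
--     xi = []
--     for i in range(n):
--         xi.append(q**nu[i] * t**(n - 1 - rank[i]))
--     return tuple(xi)
-- ===== SOURCE B (Python) =====
-- def spectral_vector(nu, n, q, t):
--     """Compute spectral vector xi_i(nu) for composition nu."""
--     # Rank without sorting: rank_i = number of indices j whose key (nu[j], -j)
--     # is strictly greater than (nu[i], -i); keys are distinct, so this equals
--     # the position in the descending stable sort.
--     return tuple(
--         q ** nu[i]
--         * t ** (n - 1 - sum(1 for j in range(n) if (nu[j], -j) > (nu[i], -i)))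
--         for i in range(n)
--     )
-- ===== Notes on version B (the rewrite author's own statement) =====
-- stated objective: alternative
-- what changed: Replaces the stable descending sort plus rank-array assignment with a direct counting pass: each rank is computed as the number of strictly greater (nu[j], -j) keys, so no sorted order or rank array is ever materialized.
-- outside the precondition, e.g. on spectral_vector([2, -1, 3], 3, 2, 2): A returns (8, 0.5, 32), B returns (8, 0.5, 32); on spectral_vector([1], 2, 2, 2): A raises IndexError, B raises IndexError
import Mathlib
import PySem

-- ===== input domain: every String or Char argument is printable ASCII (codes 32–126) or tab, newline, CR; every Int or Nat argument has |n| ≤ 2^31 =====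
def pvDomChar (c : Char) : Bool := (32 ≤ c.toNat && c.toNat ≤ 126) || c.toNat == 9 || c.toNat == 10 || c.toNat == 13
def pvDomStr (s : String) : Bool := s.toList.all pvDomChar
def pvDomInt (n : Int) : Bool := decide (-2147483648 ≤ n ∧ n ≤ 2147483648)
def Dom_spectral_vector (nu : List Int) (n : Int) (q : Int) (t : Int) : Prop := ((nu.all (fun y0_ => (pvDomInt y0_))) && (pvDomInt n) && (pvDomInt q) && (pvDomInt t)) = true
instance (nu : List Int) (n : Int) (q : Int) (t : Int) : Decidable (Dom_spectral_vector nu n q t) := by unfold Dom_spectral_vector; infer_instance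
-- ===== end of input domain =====

-- B replaces A's sort-then-rank-array by counting strictly greater keys directly (alternative algorithm, same results).

-- ===== PORT A =====
-- q ** nu[i] is ported as q ^ (…).toNat — exact since Pre_ requires nu[i] ≥ 0 there;
-- the tuple-valued sort key pairs[i] is ported with PySem.List.sorted2 (Python's lex tuple order).
def spectral_vector (nu : List Int) (n : Int) (q : Int) (t : Int) : List Int :=
  let pairs : List (Int × Int) :=
    (PySem.List.pyRange 0 n).map (fun i => (PySem.List.pyGetD nu i 0, -i))
  let sorted_indices :=
    PySem.List.sorted2 (PySem.List.pyRange 0 n)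
      (fun i => (PySem.List.pyGetD pairs i (0, 0)).1)
      (fun i => (PySem.List.pyGetD pairs i (0, 0)).2) true
  let rank :=
    (PySem.List.enumerate sorted_indices).foldl
      (fun r ri => PySem.List.pySetD r ri.2 ri.1) (List.replicate n.toNat 0)
  (PySem.List.pyRange 0 n).foldl
    (fun xi i =>
      xi ++ [q ^ (PySem.List.pyGetD nu i 0).toNat
               * t ^ (n - 1 - PySem.List.pyGetD rank i 0).toNat]) []

-- ===== PORT B =====
-- the Python tuple comparison (nu[j], -j) > (nu[i], -i) is ported by hand as its
-- lexicographic meaning (exact: both components are ints).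
def spectral_vector_alt (nu : List Int) (n : Int) (q : Int) (t : Int) : List Int :=
  (PySem.List.pyRange 0 n).map (fun i =>
    q ^ (PySem.List.pyGetD nu i 0).toNat
      * t ^ (n - 1 -
          ((PySem.List.pyRange 0 n).map (fun j =>
            if PySem.List.pyGetD nu j 0 > PySem.List.pyGetD nu i 0 ∨
               (PySem.List.pyGetD nu j 0 = PySem.List.pyGetD nu i 0 ∧ -j > -i)
            then (1 : Int) else 0)).sum).toNat)

-- ===== PRECONDITION & SPEC =====
-- Pre_ excludes exactly the inputs on which Python A does not return a value of the
-- declared type: n > len(nu) raises IndexError, and a negative nu[i] with i < n makes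
-- q ** nu[i] a float (or raise ZeroDivisionError for q = 0).
def Pre_spectral_vector (nu : List Int) (n : Int) (q : Int) (t : Int) : Prop :=
  n ≤ (nu.length : Int) ∧ ∀ x ∈ nu.take n.toNat, 0 ≤ x
instance (nu : List Int) (n : Int) (q : Int) (t : Int) : Decidable (Pre_spectral_vector nu n q t) := by
  unfold Pre_spectral_vector; infer_instance

def pvWitness_spectral_vector : List Int × Int × Int × Int := ([2, 0, 1], 3, 2, 3)

def Spec_spectral_vector (nu : List Int) (n : Int) (q : Int) (t : Int) (out : List Int) : Prop := out = spectral_vector_alt nu n q t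
instance (nu : List Int) (n : Int) (q : Int) (t : Int) (out : List Int) : Decidable (Spec_spectral_vector nu n q t out) := by unfold Spec_spectral_vector; infer_instance

-- ===== CLAIM (what is proved, stated in full; the proofs are below) =====
def Claim_equal_spectral_vector : Prop := ∀ (nu : List Int) (n : Int) (q : Int) (t : Int), Dom_spectral_vector nu n q t → Pre_spectral_vector nu n q t → Spec_spectral_vector nu n q t (spectral_vector nu n q t)

-- ===== LEMMAS AND PROOFS =====

-- sorted2 with Int keys is sorted with the lexicographic key (same insertion sort, same comparisons).
theorem sorted2_eq_sorted_toLex {α : Type} (xs : List α) (k1 k2 : α → Int) (rev : Bool) :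
    PySem.List.sorted2 xs k1 k2 rev
      = PySem.List.sorted xs (fun x => toLex (k1 x, k2 x)) rev := by
  have hlt : ∀ a b : α,
      (decide (k1 a < k1 b) || (!decide (k1 b < k1 a) && decide (k2 a < k2 b)))
        = decide (toLex (k1 a, k2 a) < toLex (k1 b, k2 b)) := by
    intro a b
    rcases lt_trichotomy (k1 a) (k1 b) with h | h | h
    · simp [Prod.Lex.lt_iff, h]
    · simp [Prod.Lex.lt_iff, h]
    · simp [Prod.Lex.lt_iff, h, h.ne', not_lt_of_gt h]
  unfold PySem.List.sorted2 PySem.List.sorted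
  cases rev <;> simp only [] <;> congr 1 <;> funext acc x <;> congr 1 <;>
    funext a b <;> simp [hlt]

-- value at an index never written by the enumerate/set fold
theorem fold_set_notmem (ys : List Int) (acc : List Int) (s j : Int)
    (hpos : ∀ p ∈ ys, 0 ≤ p) (hj : 0 ≤ j) (hmem : j ∉ ys) :
    PySem.List.pyGetD
      ((PySem.List.enumerate ys s).foldl (fun r ri => PySem.List.pySetD r ri.2 ri.1) acc) j 0
      = PySem.List.pyGetD acc j 0 := by
  induction ys generalizing acc s with
  | nil => simp [PySem.List.enumerate_nil]
  | cons y t ih =>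
    rw [PySem.List.enumerate_cons, List.foldl_cons]
    have hy : (0 : Int) ≤ y := hpos y (by simp)
    have hne : j ≠ y := fun h => hmem (h ▸ List.mem_cons_self)
    rw [ih _ _ (fun p hp => hpos p (List.mem_cons_of_mem _ hp)) (fun h => hmem (List.mem_cons_of_mem _ h))]
    rw [PySem.List.pySetD_of_nonneg _ _ hy, PySem.List.pyGetD_of_nonneg _ _ hj,
        PySem.List.pyGetD_of_nonneg _ _ hj]
    rw [List.getD_eq_getElem?_getD, List.getD_eq_getElem?_getD,
        List.getElem?_set_ne (by omega)]

-- value at an index of ys after the enumerate/set fold: its position in ys, offset by s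
theorem fold_set_mem (ys : List Int) (acc : List Int) (s i : Int)
    (hnd : ys.Nodup) (hrange : ∀ p ∈ ys, 0 ≤ p ∧ p.toNat < acc.length) (hmem : i ∈ ys) :
    PySem.List.pyGetD
      ((PySem.List.enumerate ys s).foldl (fun r ri => PySem.List.pySetD r ri.2 ri.1) acc) i 0
      = s + (List.idxOf i ys : Int) := by
  induction ys generalizing acc s with
  | nil => cases hmem
  | cons y t ih =>
    rw [PySem.List.enumerate_cons, List.foldl_cons]
    have hy := hrange y (by simp)
    by_cases hiy : i = y
    · subst hiy
      have hnot : i ∉ t := (List.nodup_cons.mp hnd).1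
      rw [fold_set_notmem t _ (s + 1) i (fun p hp => (hrange p (List.mem_cons_of_mem _ hp)).1) hy.1 hnot]
      rw [PySem.List.pySetD_of_nonneg _ _ hy.1, PySem.List.pyGetD_of_nonneg _ _ hy.1]
      rw [List.getD_eq_getElem?_getD, List.getElem?_set_self (by simpa using hy.2)]
      simp
    · have hit : i ∈ t := (List.mem_cons.mp hmem).resolve_left hiy
      rw [ih _ _ (List.nodup_cons.mp hnd).2
            (fun p hp => by
              have := hrange p (List.mem_cons_of_mem _ hp)
              simpa [PySem.List.pySetD_of_nonneg _ _ hy.1] using this) hit]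
      rw [List.idxOf_cons_ne _ (Ne.symm hiy)]
      push_cast
      ring

-- in a strictly key-descending list, the position of i is the number of strictly greater keys
theorem countP_gt_eq_idxOf {κ : Type} [LinearOrder κ] (key : Int → κ) :
    ∀ (ys : List Int) (i : Int), ys.Pairwise (fun a b => key b < key a) → i ∈ ys →
      ys.countP (fun j => decide (key i < key j)) = List.idxOf i ys := by
  intro ys
  induction ys with
  | nil => intro i _ h; cases h
  | cons y t ih =>
    intro i hpw hmem
    have hhead : ∀ j ∈ t, key j < key y := fun j hj => (List.pairwise_cons.mp hpw).1 j hj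
    by_cases hiy : i = y
    · subst hiy
      rw [List.countP_cons, List.idxOf_cons_self]
      have h0 : t.countP (fun j => decide (key i < key j)) = 0 :=
        List.countP_eq_zero.mpr (fun j hj => by simp [not_lt_of_gt (hhead j hj)])
      simp [h0]
    · have hit : i ∈ t := (List.mem_cons.mp hmem).resolve_left hiy
      rw [List.countP_cons, List.idxOf_cons_ne _ (Ne.symm hiy),
          ih i (List.pairwise_cons.mp hpw).2 hit]
      simp [hhead i hit]

-- ===== VERDICT (by name: the statement is the Claim_ definition above) =====
theorem spectral_vector_spec : Claim_equal_spectral_vector := by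
  intro nu n q t _hDom _hPre
  unfold Spec_spectral_vector spectral_vector spectral_vector_alt
  simp only [PySem.List.foldl_append_singleton_eq_map, List.nil_append,
    sorted2_eq_sorted_toLex]
  apply List.map_congr_left
  intro i hi
  rw [PySem.List.mem_pyRange_one] at hi
  -- names for the pieces
  set key : Int → Lex (Int × Int) := fun j =>
    toLex ((PySem.List.pyGetD ((PySem.List.pyRange 0 n).map
              (fun i => (PySem.List.pyGetD nu i 0, -i))) j (0, 0)).1,
           (PySem.List.pyGetD ((PySem.List.pyRange 0 n).map
              (fun i => (PySem.List.pyGetD nu i 0, -i))) j (0, 0)).2) with hkeydef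
  set ys := PySem.List.sorted (PySem.List.pyRange 0 n) key true with hysdef
  have hkey : ∀ j, 0 ≤ j → j < n → key j = toLex (PySem.List.pyGetD nu j 0, -j) := by
    intro j h0 h1
    rw [hkeydef]
    beta_reduce
    rw [PySem.List.pyGetD_map_pyRange_of_nonneg (fun i => (PySem.List.pyGetD nu i 0, -i)) n j (0, 0) h0 h1]
  have hperm : ys.Perm (PySem.List.pyRange 0 n) := PySem.List.sorted_perm _ _ _
  have hmemys : ∀ p, p ∈ ys ↔ (0 ≤ p ∧ p < n) := by
    intro p; rw [hperm.mem_iff, PySem.List.mem_pyRange_one]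
  have hnd : ys.Nodup := hperm.nodup_iff.mpr (PySem.List.nodup_pyRange_one 0 n)
  -- strict descending order of keys along ys
  have hpw : ys.Pairwise (fun a b => key b < key a) := by
    have h1 : ys.Pairwise (fun a b => key b ≤ key a) :=
      PySem.List.sorted_pairwise_rev _ _
    have h2 : ys.Pairwise (fun a b : Int => a ≠ b) := hnd
    refine (h1.and h2).imp_of_mem ?_
    intro a b ha hb hab
    rcases hab with ⟨hle, hne⟩
    rcases (hmemys a).mp ha with ⟨ha0, ha1⟩
    rcases (hmemys b).mp hb with ⟨hb0, hb1⟩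
    refine lt_of_le_of_ne hle (fun hk => hne ?_)
    rw [hkey a ha0 ha1, hkey b hb0 hb1] at hk
    have := congrArg (fun x => (ofLex x).2) hk
    simpa using this.symm
  have hiys : i ∈ ys := (hmemys i).mpr hi
  -- the rank array lookup is the position of i in ys
  have hrank : PySem.List.pyGetD
      ((PySem.List.enumerate ys).foldl (fun r ri => PySem.List.pySetD r ri.2 ri.1)
        (List.replicate n.toNat 0)) i 0 = (List.idxOf i ys : Int) := by
    have := fold_set_mem ys (List.replicate n.toNat 0) 0 i hnd
      (fun p hp => by
        rcases (hmemys p).mp hp with ⟨h0, h1⟩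
        exact ⟨h0, by simp; omega⟩) hiys
    simpa using this
  -- the position of i in ys is the number of strictly greater keys
  have hcount : (List.idxOf i ys : Int)
      = ((PySem.List.pyRange 0 n).map (fun j =>
          if PySem.List.pyGetD nu j 0 > PySem.List.pyGetD nu i 0 ∨
             (PySem.List.pyGetD nu j 0 = PySem.List.pyGetD nu i 0 ∧ -j > -i)
          then (1 : Int) else 0)).sum := by
    rw [← countP_gt_eq_idxOf key ys i hpw hiys,
        hperm.countP_eq (fun j => decide (key i < key j))]
    have hc : List.countP (fun j => decide (key i < key j)) (PySem.List.pyRange 0 n)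
        = List.countP (fun j => decide (PySem.List.pyGetD nu j 0 > PySem.List.pyGetD nu i 0 ∨
            (PySem.List.pyGetD nu j 0 = PySem.List.pyGetD nu i 0 ∧ -j > -i)))
            (PySem.List.pyRange 0 n) := by
      apply List.countP_congr
      intro j hj
      rw [PySem.List.mem_pyRange_one] at hj
      simp only [decide_eq_true_eq]
      rw [hkey i hi.1 hi.2, hkey j hj.1 hj.2, Prod.Lex.lt_iff]
      constructor
      · rintro (h | ⟨h1, h2⟩)
        · exact Or.inl h
        · exact Or.inr ⟨h1.symm, by simpa using h2⟩
      · rintro (h | ⟨h1, h2⟩)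
        · exact Or.inl h
        · exact Or.inr ⟨h1.symm, by simpa using h2⟩
    rw [hc, ← PySem.List.sum_map_ite_one_zero]
    simp only [decide_eq_true_eq]
  rw [hrank, hcount]
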